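-- pv_equiv track=rewrite | github.com/daniel-reich/ubiquitous-fiesta | eDQDChGrv6y4fd44j_9.py | can_put
-- ===== SOURCE A (Python) =====
-- def can_put(txt, dim):
--   txt = txt.split()
--   row_count = dim[0]
--   row_length = dim[1]
--
--   n = 0
--
--   while n < len(txt):
--     if row_count < 1:
--       return False
--     row_count -= 1
--     if len(txt[n]) > row_length:
--       return False
--     else:
--       remaining_space = row_length - len(txt[n])
--     if n+1 < len(txt) and remaining_space >= len(txt[n+1]) + 1:
--       n += 2
--     else:
--       n += 1
--
--   return True
-- ===== SOURCE B (Python) =====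
-- def can_put(txt, dim):
--     words = txt.split()
--     if not words:
--         return True
--     if any(len(w) > dim[1] for w in words):
--         return False
--     # Rows needed = words - merges, where merges is computed per maximal run of
--     # adjacent pairs that fit together: a run of k consecutive fitting pairs
--     # yields ceil(k/2) two-word rows.
--     lens = [len(w) for w in words]
--     fits = [dim[1] - a >= b + 1 for a, b in zip(lens, lens[1:])]
--     merges = 0
--     run = 0
--     for f in fits:
--         if f:
--             run += 1
--         else:
--             merges += (run + 1) // 2
--             run = 0
--     merges += (run + 1) // 2
--     return len(words) - merges <= dim[0]
-- ===== Notes on version B (the rewrite author's own statement) =====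
-- stated objective: alternative
-- what changed: Instead of A's single greedy while-loop with index lookahead and variable stride, B first rejects any over-wide word, then builds the list of adjacent-pair 'fits together' booleans and counts the rows needed arithmetically as n_words minus the sum of ceil(run/2) over maximal runs of consecutive fitting pairs, comparing that count against dim[0].
import Mathlib
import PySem

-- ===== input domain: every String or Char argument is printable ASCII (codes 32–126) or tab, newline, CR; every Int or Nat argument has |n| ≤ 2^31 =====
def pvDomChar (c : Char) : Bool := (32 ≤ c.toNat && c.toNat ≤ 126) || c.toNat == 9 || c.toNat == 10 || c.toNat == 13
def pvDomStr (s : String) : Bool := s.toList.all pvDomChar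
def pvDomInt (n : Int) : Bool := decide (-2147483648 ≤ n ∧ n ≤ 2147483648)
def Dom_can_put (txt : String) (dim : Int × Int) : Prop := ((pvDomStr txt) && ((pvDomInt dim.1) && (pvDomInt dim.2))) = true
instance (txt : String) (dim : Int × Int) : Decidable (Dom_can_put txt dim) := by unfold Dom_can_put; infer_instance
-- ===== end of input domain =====

-- B replaces A's greedy while-loop (index lookahead, stride n+=1/n+=2) by a staged computation:
-- reject over-wide words, build the adjacent-pair "fits together" boolean list, and count the rows
-- needed as n_words minus the sum of ceil(run/2) over maximal runs of fitting pairs (alternative; same cost).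

-- ===== PORT A =====
-- A's while loop over the word index n; fuel is a pure totality guard (each iteration
-- increases n by at least 1, so fuel = ws.length always suffices; fuel 0 ⇒ n ≥ ws.length ⇒ loop exit).
def canPutLoopA (ws : List String) (rowCount rowLength : Int) (n : Nat) : Nat → Bool
  | 0 => true
  | fuel + 1 =>
    if n < ws.length then
      if rowCount < 1 then false
      else
        let rowCount' := rowCount - 1
        if PySem.Str.len (ws.getD n "") > rowLength then false
        else
          let remaining := rowLength - PySem.Str.len (ws.getD n "")
          if n + 1 < ws.length ∧ remaining ≥ PySem.Str.len (ws.getD (n+1) "") + 1 then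
            canPutLoopA ws rowCount' rowLength (n+2) fuel
          else
            canPutLoopA ws rowCount' rowLength (n+1) fuel
    else true

def can_put (txt : String) (dim : Int × Int) : Bool :=
  canPutLoopA (PySem.Str.split₀ txt) dim.1 dim.2 0 (PySem.Str.split₀ txt).length

-- ===== PORT B =====
-- the for-loop over fits accumulating (merges, run); at the end adds the last run's ceil(run/2)
def canPutMergesB : List Bool → Int → Int → Int
  | [], m, run => m + PySem.Int.floordiv (run + 1) 2
  | f :: t, m, run =>
    if f then canPutMergesB t m (run + 1)
    else canPutMergesB t (m + PySem.Int.floordiv (run + 1) 2) 0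

def can_put_alt (txt : String) (dim : Int × Int) : Bool :=
  let words := PySem.Str.split₀ txt
  if words.isEmpty then true
  else if words.any (fun w => PySem.Str.len w > dim.2) then false
  else
    let lens := words.map PySem.Str.len
    let fits := (lens.zip (PySem.List.slice lens (some 1) none)).map
        (fun p => decide (dim.2 - p.1 ≥ p.2 + 1))
    decide ((words.length : Int) - canPutMergesB fits 0 0 ≤ dim.1)

-- ===== PRECONDITION & SPEC =====
def Spec_can_put (txt : String) (dim : Int × Int) (out : Bool) : Prop := out = can_put_alt txt dim
instance (txt : String) (dim : Int × Int) (out : Bool) : Decidable (Spec_can_put txt dim out) := by unfold Spec_can_put; infer_instance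

-- ===== CLAIM (what is proved, stated in full; the proofs are below) =====
def Claim_equal_can_put : Prop := ∀ (txt : String) (dim : Int × Int), Dom_can_put txt dim → Spec_can_put txt dim (can_put txt dim)

-- ===== LEMMAS AND PROOFS =====

-- A's loop rewritten structurally on the suffix of words still to place
def gLoop (width : Int) : List String → Int → Bool
  | [], _ => true
  | [w], rc =>
    if rc < 1 then false
    else if PySem.Str.len w > width then false
    else true
  | w :: w2 :: rest2, rc =>
    if rc < 1 then false
    else if PySem.Str.len w > width then false
    else if width - PySem.Str.len w ≥ PySem.Str.len w2 + 1 then gLoop width rest2 (rc - 1)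
    else gLoop width (w2 :: rest2) (rc - 1)

-- rows the greedy layout needs (no row-count / width limit applied)
def rn (width : Int) : List String → Int
  | [] => 0
  | [_] => 1
  | w :: w2 :: rest =>
    if width - PySem.Str.len w ≥ PySem.Str.len w2 + 1 then 1 + rn width rest
    else 1 + rn width (w2 :: rest)

-- the adjacent-pair "fit together" booleans
def fitsL (width : Int) : List String → List Bool
  | w :: w2 :: rest => decide (width - PySem.Str.len w ≥ PySem.Str.len w2 + 1) :: fitsL width (w2 :: rest)
  | _ => []

-- merges the greedy layout performs, read off the fits list
def gm : List Bool → Int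
  | [] => 0
  | true :: t => 1 + gm (t.drop 1)
  | false :: t => gm t
termination_by l => l.length
decreasing_by all_goals (simp; try omega)

theorem strLen_nonneg (w : String) : 0 ≤ PySem.Str.len w := by
  simp [PySem.Str.len_eq]

theorem A_succ (ws : List String) (rc rl : Int) (n fuel : Nat) :
    canPutLoopA ws rc rl n (fuel + 1) =
      if n < ws.length then
        if rc < 1 then false
        else if PySem.Str.len (ws.getD n "") > rl then false
        else if n + 1 < ws.length ∧
            rl - PySem.Str.len (ws.getD n "") ≥ PySem.Str.len (ws.getD (n+1) "") + 1 then
          canPutLoopA ws (rc - 1) rl (n+2) fuel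
        else canPutLoopA ws (rc - 1) rl (n+1) fuel
      else true := rfl

theorem loop_eq_gLoop (ws : List String) (rl : Int) (fuel : Nat) :
    ∀ n rc, ws.length - n ≤ fuel →
      canPutLoopA ws rc rl n fuel = gLoop rl (ws.drop n) rc := by
  induction fuel with
  | zero =>
    intro n rc h
    rw [List.drop_eq_nil_of_le (by omega)]; rfl
  | succ fuel ih =>
    intro n rc h
    by_cases hn : n < ws.length
    · have hdrop : ws.drop n = ws[n] :: ws.drop (n+1) := List.drop_eq_getElem_cons hn
      have hget : ws.getD n "" = ws[n] := by
        simp [List.getD_eq_getElem?_getD, List.getElem?_eq_getElem hn]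
      by_cases hn1 : n + 1 < ws.length
      · have hget1 : ws.getD (n+1) "" = ws[n+1] := by
          simp [List.getD_eq_getElem?_getD, List.getElem?_eq_getElem hn1]
        have hdrop1 : ws.drop (n+1) = ws[n+1] :: ws.drop (n+2) := List.drop_eq_getElem_cons hn1
        rw [A_succ, if_pos hn, hget, hget1, hdrop, hdrop1, gLoop]
        by_cases hrc : rc < 1
        · rw [if_pos hrc, if_pos hrc]
        rw [if_neg hrc, if_neg hrc]
        by_cases hlen : PySem.Str.len ws[n] > rl
        · rw [if_pos hlen, if_pos hlen]
        rw [if_neg hlen, if_neg hlen]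
        by_cases hc : rl - PySem.Str.len ws[n] ≥ PySem.Str.len ws[n+1] + 1
        · rw [if_pos ⟨hn1, hc⟩, if_pos hc, ih (n+2) _ (by omega)]
        · rw [if_neg (fun hand => hc hand.2), if_neg hc, ih (n+1) _ (by omega), hdrop1]
      · have hnil : ws.drop (n+1) = [] := List.drop_eq_nil_of_le (by omega)
        rw [A_succ, if_pos hn, hget, hdrop, hnil, gLoop]
        by_cases hrc : rc < 1
        · rw [if_pos hrc, if_pos hrc]
        rw [if_neg hrc, if_neg hrc]
        by_cases hlen : PySem.Str.len ws[n] > rl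
        · rw [if_pos hlen, if_pos hlen]
        rw [if_neg hlen, if_neg hlen,
          if_neg (fun hand : n + 1 < ws.length ∧ _ => hn1 hand.1),
          ih (n+1) _ (by omega), hnil, gLoop]
    · rw [A_succ, if_neg hn, List.drop_eq_nil_of_le (by omega)]; rfl

theorem gLoop_tooLong (width : Int) (ls : List String) (rc : Int)
    (h : ∃ w ∈ ls, width < PySem.Str.len w) : gLoop width ls rc = false := by
  match ls with
  | [] => simp at h
  | [w] =>
    obtain ⟨w', hw', hlong⟩ := h
    simp at hw'
    subst hw'
    rw [gLoop]
    by_cases hrc : rc < 1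
    · rw [if_pos hrc]
    · rw [if_neg hrc, if_pos (by omega)]
  | w :: w2 :: rest2 =>
    rw [gLoop]
    by_cases hrc : rc < 1
    · rw [if_pos hrc]
    rw [if_neg hrc]
    by_cases hw : PySem.Str.len w > width
    · rw [if_pos hw]
    rw [if_neg hw]
    obtain ⟨w', hw', hlong⟩ := h
    have hw'ne : w' ≠ w := by rintro rfl; omega
    have hw'rest : w' ∈ w2 :: rest2 := by
      rcases List.mem_cons.mp hw' with h1 | h1
      · exact absurd h1 hw'ne
      · exact h1
    by_cases hfit : width - PySem.Str.len w ≥ PySem.Str.len w2 + 1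
    · rw [if_pos hfit]
      have h0 := strLen_nonneg w
      have hw'2 : w' ≠ w2 := by rintro rfl; omega
      have hmem : w' ∈ rest2 := by
        rcases List.mem_cons.mp hw'rest with h1 | h1
        · exact absurd h1 hw'2
        · exact h1
      exact gLoop_tooLong width rest2 _ ⟨w', hmem, hlong⟩
    · rw [if_neg hfit]
      exact gLoop_tooLong width (w2 :: rest2) _ ⟨w', hw'rest, hlong⟩
termination_by ls.length
decreasing_by all_goals (simp; try omega)

theorem rn_nonneg (width : Int) (ls : List String) : 0 ≤ rn width ls := by
  match ls with
  | [] => simp [rn]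
  | [w] => simp [rn]
  | w :: w2 :: rest =>
    rw [rn]
    split
    · have := rn_nonneg width rest; omega
    · have := rn_nonneg width (w2 :: rest); omega
termination_by ls.length
decreasing_by all_goals (simp; try omega)

theorem rn_pos (width : Int) (w : String) (rest : List String) :
    1 ≤ rn width (w :: rest) := by
  match rest with
  | [] => simp [rn]
  | w2 :: rest2 =>
    rw [rn]; split
    · have := rn_nonneg width rest2; omega
    · have := rn_nonneg width (w2 :: rest2); omega

theorem gLoop_ok (width : Int) (ls : List String) (rc : Int)
    (hall : ∀ w ∈ ls, PySem.Str.len w ≤ width) (hnil : ls = [] → 0 ≤ rc) :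
    gLoop width ls rc = decide (rn width ls ≤ rc) := by
  match ls with
  | [] =>
    have := hnil rfl
    rw [gLoop, rn]
    simp; omega
  | [w] =>
    rw [gLoop, rn]
    by_cases hrc : rc < 1
    · rw [if_pos hrc]; simp; omega
    · rw [if_neg hrc, if_neg (by have := hall w (by simp); omega)]
      simp; omega
  | w :: w2 :: rest2 =>
    rw [gLoop]
    by_cases hrc : rc < 1
    · rw [if_pos hrc]
      have := rn_pos width w (w2 :: rest2)
      simp; omega
    rw [if_neg hrc]
    rw [if_neg (by have := hall w (by simp); omega)]
    by_cases hfit : width - PySem.Str.len w ≥ PySem.Str.len w2 + 1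
    · rw [if_pos hfit,
        gLoop_ok width rest2 _ (fun x hx => hall x (by simp [hx])) (fun _ => by omega),
        rn, if_pos hfit]
      simp; omega
    · rw [if_neg hfit,
        gLoop_ok width (w2 :: rest2) _ (fun x hx => hall x (by simp at hx ⊢; tauto)) (by simp),
        rn, if_neg hfit]
      simp; omega
termination_by ls.length
decreasing_by all_goals (simp; try omega)

theorem fitsL_cons_drop (width : Int) (w2 : String) (rest : List String) :
    (fitsL width (w2 :: rest)).drop 1 = fitsL width rest := by
  match rest with
  | [] => rfl
  | c :: r' => rfl

theorem rn_eq_gm (width : Int) (ls : List String) :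
    rn width ls = (ls.length : Int) - gm (fitsL width ls) := by
  match ls with
  | [] => simp [rn, fitsL, gm]
  | [w] => simp [rn, fitsL, gm]
  | w :: w2 :: rest =>
    rw [rn, fitsL]
    by_cases hfit : width - PySem.Str.len w ≥ PySem.Str.len w2 + 1
    · rw [if_pos hfit, decide_eq_true hfit, gm, fitsL_cons_drop, rn_eq_gm width rest]
      simp; omega
    · rw [if_neg hfit, decide_eq_false hfit, gm, rn_eq_gm width (w2 :: rest)]
      simp; omega
termination_by ls.length
decreasing_by all_goals (simp; try omega)

theorem gm_replicate_true (r : Nat) :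
    gm (List.replicate r true) = (((r + 1) / 2 : Nat) : Int) := by
  match r with
  | 0 => simp [gm]
  | 1 => simp [List.replicate, gm]
  | r + 2 =>
    rw [show List.replicate (r + 2) true = true :: true :: List.replicate r true from by
          simp [List.replicate_succ]]
    rw [gm, List.drop_one, List.tail_cons, gm_replicate_true r]
    have h2 : (r + 2 + 1) / 2 = (r + 1) / 2 + 1 := by omega
    rw [h2]; push_cast; ring
termination_by r

theorem gm_replicate_true_append (t : List Bool) (r : Nat) :
    gm (List.replicate r true ++ false :: t) = (((r + 1) / 2 : Nat) : Int) + gm t := by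
  match r with
  | 0 => simp [gm]
  | 1 => simp [List.replicate, gm]
  | r + 2 =>
    rw [show List.replicate (r + 2) true ++ false :: t
          = true :: true :: (List.replicate r true ++ false :: t) from by
          simp [List.replicate_succ]]
    rw [gm, List.drop_one, List.tail_cons, gm_replicate_true_append t r]
    have h2 : (r + 2 + 1) / 2 = (r + 1) / 2 + 1 := by omega
    rw [h2]; push_cast; ring
termination_by r

theorem floordiv_half_nat (r : Nat) :
    PySem.Int.floordiv ((r : Int) + 1) 2 = (((r + 1) / 2 : Nat) : Int) := by
  have h : ((r : Int) + 1) = (((r + 1 : Nat)) : Int) := by push_cast; ring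
  rw [h]
  exact_mod_cast PySem.Int.floordiv_natCast (r + 1) 2

theorem mergesB_eq_gm : ∀ (t : List Bool) (m : Int) (r : Nat),
    canPutMergesB t m (r : Int) = m + gm (List.replicate r true ++ t) := by
  intro t
  induction t with
  | nil =>
    intro m r
    rw [canPutMergesB, floordiv_half_nat, List.append_nil, gm_replicate_true]
  | cons f t iht =>
    intro m r
    cases f with
    | true =>
      rw [canPutMergesB, if_pos rfl]
      have h : (r : Int) + 1 = ((r + 1 : Nat) : Int) := by push_cast; ring
      rw [h, iht m (r + 1)]
      congr 1
      rw [List.replicate_succ']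
      simp
    | false =>
      rw [canPutMergesB, if_neg (by simp)]
      have h0 : (0 : Int) = ((0 : Nat) : Int) := rfl
      rw [floordiv_half_nat, h0, iht _ 0]
      simp only [List.replicate, List.nil_append]
      rw [gm_replicate_true_append]
      ring

theorem fits_map_eq_fitsL (width : Int) : ∀ (ws : List String),
    (((ws.map PySem.Str.len).zip ((ws.map PySem.Str.len).tail)).map
        (fun p => decide (width - p.1 ≥ p.2 + 1))) = fitsL width ws := by
  intro ws
  induction ws with
  | nil => rfl
  | cons w rest ih =>
    match rest with
    | [] => rfl
    | w2 :: rest2 =>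
      simp only [List.map_cons, List.tail_cons, List.zip_cons_cons] at ih ⊢
      rw [fitsL, ← ih]

-- ===== VERDICT (by name: the statement is the Claim_ definition above) =====
theorem can_put_spec : Claim_equal_can_put := by
  intro txt dim _
  unfold Spec_can_put can_put can_put_alt
  rw [loop_eq_gLoop _ _ _ 0 dim.1 (by omega), List.drop_zero]
  cases hws : PySem.Str.split₀ txt with
  | nil => rw [gLoop]; rfl
  | cons w rest =>
    simp only [List.isEmpty_cons, Bool.false_eq_true, if_false,
      PySem.List.slice_from_one, fits_map_eq_fitsL]
    by_cases hany : (w :: rest).any (fun w => decide (PySem.Str.len w > dim.2)) = true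
    · rw [if_pos hany]
      obtain ⟨x, hx, hxl⟩ := List.any_eq_true.mp hany
      exact gLoop_tooLong dim.2 _ _ ⟨x, hx, by simpa using hxl⟩
    · rw [if_neg hany]
      have hall : ∀ x ∈ w :: rest, PySem.Str.len x ≤ dim.2 := by
        intro x hx
        by_contra hgt
        exact hany (List.any_eq_true.mpr ⟨x, hx, by simpa using lt_of_not_ge hgt⟩)
      rw [gLoop_ok dim.2 _ _ hall (by simp)]
      have h0 : (0 : Int) = ((0 : Nat) : Int) := rfl
      rw [h0, mergesB_eq_gm, List.replicate, List.nil_append, rn_eq_gm]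
      simp only [decide_eq_decide]
      omega
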